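-- pv_equiv track=rewrite | github.com/tvtejas/Opinion_mining | feature/text_processing.py | noun
-- ===== SOURCE A (Python) =====
-- def noun(review_tags):
-- #     review_tags = pos(review_tags)
--     nouns = []
--     noun_list = []
--     for i in range(len(review_tags)):
--         temp = []
--         for j in range(len(review_tags[i])):
--             if review_tags[i][j][1] in ['NOUN','PROPN']:
--                 temp.append(str(review_tags[i][j][0]))
--         nouns.append(temp)
--         for i in nouns:
--             a = [w for w in i if len(w)>1]
--         noun_list.append(a)
--     return(noun_list)
-- ===== SOURCE B (Python) =====
-- def noun(review_tags):
--     return [[w for w, t in tags if t in ('NOUN', 'PROPN') and len(w) > 1]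
--             for tags in review_tags]
-- ===== Notes on version B (the rewrite author's own statement) =====
-- stated objective: faster
-- what changed: B builds each output row in a single comprehension over the review's tags, dropping A's extra nouns accumulator and its per-review rescan of all previously collected noun lists.
import Mathlib
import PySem

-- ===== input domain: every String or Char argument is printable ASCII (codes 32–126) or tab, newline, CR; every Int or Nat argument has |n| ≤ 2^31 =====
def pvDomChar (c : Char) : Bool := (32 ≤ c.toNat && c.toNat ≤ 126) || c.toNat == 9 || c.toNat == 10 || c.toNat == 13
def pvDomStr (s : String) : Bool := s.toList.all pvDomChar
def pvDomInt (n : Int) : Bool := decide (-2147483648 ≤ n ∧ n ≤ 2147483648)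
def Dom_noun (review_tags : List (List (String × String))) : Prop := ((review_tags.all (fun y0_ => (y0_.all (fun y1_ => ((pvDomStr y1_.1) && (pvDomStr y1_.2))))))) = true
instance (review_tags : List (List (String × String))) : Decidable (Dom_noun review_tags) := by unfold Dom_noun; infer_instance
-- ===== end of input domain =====

-- B replaces A's quadratic rescan of all previously collected noun lists by one comprehension per review (asymptotically faster).


-- ===== PORT A =====
-- literal transliteration: indexed loops via pyRange/pyGetD; 'for i in nouns: a = […]'
-- leaves a = the filtered LAST element of nouns (the dummy init is never the result, nouns ≠ [] there)
def noun (review_tags : List (List (String × String))) : List (List String) :=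
  let st := (PySem.List.pyRange 0 (PySem.List.len review_tags) 1).foldl
    (fun (st : List (List String) × List (List String)) i =>
      let row := PySem.List.pyGetD review_tags i []
      let temp := (PySem.List.pyRange 0 (PySem.List.len row) 1).foldl
        (fun temp j =>
          let p := PySem.List.pyGetD row j ("", "")
          if p.2 = "NOUN" ∨ p.2 = "PROPN" then temp ++ [p.1] else temp) []
      let nouns := st.1 ++ [temp]
      let a := nouns.foldl (fun _ l => l.filter (fun w => PySem.Str.len w > 1)) []
      (nouns, st.2 ++ [a]))
    ([], [])
  st.2

-- ===== PORT B =====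
def noun_alt (review_tags : List (List (String × String))) : List (List String) :=
  review_tags.map (fun tags =>
    tags.filterMap (fun p =>
      if (p.2 = "NOUN" ∨ p.2 = "PROPN") ∧ PySem.Str.len p.1 > 1 then some p.1 else none))

-- ===== PRECONDITION & SPEC =====
def Spec_noun (review_tags : List (List (String × String))) (out : List (List String)) : Prop := out = noun_alt review_tags
instance (review_tags : List (List (String × String))) (out : List (List String)) : Decidable (Spec_noun review_tags out) := by unfold Spec_noun; infer_instance

-- ===== CLAIM (what is proved, stated in full; the proofs are below) =====
def Claim_equal_noun : Prop := ∀ (review_tags : List (List (String × String))), Dom_noun review_tags → Spec_noun review_tags (noun review_tags)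

-- ===== LEMMAS AND PROOFS =====

theorem noun_temp_go (row : List (String × String)) (acc : List String) :
    row.foldl (fun temp p =>
      if p.2 = "NOUN" ∨ p.2 = "PROPN" then temp ++ [p.1] else temp) acc
    = acc ++ (row.filter (fun p => decide (p.2 = "NOUN" ∨ p.2 = "PROPN"))).map Prod.fst := by
  induction row generalizing acc with
  | nil => simp
  | cons p rest ih =>
    by_cases h1 : p.2 = "NOUN" ∨ p.2 = "PROPN" <;>
      simp [h1, ih]

-- the inner loop builds exactly the filtered first components of the row
theorem noun_temp_eq (row : List (String × String)) :
    (PySem.List.pyRange 0 (PySem.List.len row) 1).foldl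
      (fun temp j =>
        let p := PySem.List.pyGetD row j ("", "")
        if p.2 = "NOUN" ∨ p.2 = "PROPN" then temp ++ [p.1] else temp) []
    = (row.filter (fun p => decide (p.2 = "NOUN" ∨ p.2 = "PROPN"))).map Prod.fst := by
  rw [PySem.List.foldl_pyRange_zero_pyGetD row ("", "")
      (fun temp p => if p.2 = "NOUN" ∨ p.2 = "PROPN" then temp ++ [p.1] else temp) []]
  simpa using noun_temp_go row []

-- filter-then-filter-map equals the one-pass comprehension of B
theorem noun_row_eq (row : List (String × String)) :
    ((row.filter (fun p => decide (p.2 = "NOUN" ∨ p.2 = "PROPN"))).map Prod.fst).filter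
      (fun w => decide (PySem.Str.len w > 1))
    = row.filterMap (fun p =>
        if (p.2 = "NOUN" ∨ p.2 = "PROPN") ∧ PySem.Str.len p.1 > 1 then some p.1 else none) := by
  induction row with
  | nil => rfl
  | cons p rest ih =>
    by_cases h1 : p.2 = "NOUN" ∨ p.2 = "PROPN" <;>
      by_cases h2 : 1 < p.1.length <;>
      · simp [PySem.Str.len_eq, h1, h2]
        simpa [PySem.Str.len_eq] using ih

-- the per-review body of A's outer loop, as a function of the row and the state
def nounBody (st : List (List String) × List (List String)) (row : List (String × String)) :
    List (List String) × List (List String) :=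
  (st.1 ++ [(row.filter (fun p => decide (p.2 = "NOUN" ∨ p.2 = "PROPN"))).map Prod.fst],
   st.2 ++ [row.filterMap (fun p =>
      if (p.2 = "NOUN" ∨ p.2 = "PROPN") ∧ PySem.Str.len p.1 > 1 then some p.1 else none)])

theorem noun_body_eq (st : List (List String) × List (List String)) (row : List (String × String)) :
    (let temp := (PySem.List.pyRange 0 (PySem.List.len row) 1).foldl
        (fun temp j =>
          let p := PySem.List.pyGetD row j ("", "")
          if p.2 = "NOUN" ∨ p.2 = "PROPN" then temp ++ [p.1] else temp) []
     let nouns := st.1 ++ [temp]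
     let a := nouns.foldl (fun _ l => l.filter (fun w => PySem.Str.len w > 1)) []
     ((nouns, st.2 ++ [a]) : List (List String) × List (List String)))
    = nounBody st row := by
  simp only [noun_temp_eq, List.foldl_append, List.foldl_cons, List.foldl_nil,
    noun_row_eq, nounBody]

theorem noun_outer_eq (review_tags : List (List (String × String)))
    (st : List (List String) × List (List String)) :
    (PySem.List.pyRange 0 (PySem.List.len review_tags) 1).foldl
      (fun (st : List (List String) × List (List String)) i =>
        let row := PySem.List.pyGetD review_tags i []
        let temp := (PySem.List.pyRange 0 (PySem.List.len row) 1).foldl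
          (fun temp j =>
            let p := PySem.List.pyGetD row j ("", "")
            if p.2 = "NOUN" ∨ p.2 = "PROPN" then temp ++ [p.1] else temp) []
        let nouns := st.1 ++ [temp]
        let a := nouns.foldl (fun _ l => l.filter (fun w => PySem.Str.len w > 1)) []
        (nouns, st.2 ++ [a])) st
    = review_tags.foldl nounBody st := by
  rw [PySem.List.foldl_pyRange_zero_pyGetD review_tags []
      (fun (st : List (List String) × List (List String)) row =>
        let temp := (PySem.List.pyRange 0 (PySem.List.len row) 1).foldl
          (fun temp j =>
            let p := PySem.List.pyGetD row j ("", "")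
            if p.2 = "NOUN" ∨ p.2 = "PROPN" then temp ++ [p.1] else temp) []
        let nouns := st.1 ++ [temp]
        let a := nouns.foldl (fun _ l => l.filter (fun w => PySem.Str.len w > 1)) []
        (nouns, st.2 ++ [a])) st]
  exact List.foldl_ext _ _ st (fun st row _ => noun_body_eq st row)

theorem noun_foldl_snd (review_tags : List (List (String × String)))
    (st : List (List String) × List (List String)) :
    (review_tags.foldl nounBody st).2 = st.2 ++ noun_alt review_tags := by
  induction review_tags generalizing st with
  | nil => simp [noun_alt]
  | cons row rest ih =>
    simp only [List.foldl_cons, ih, nounBody, noun_alt, List.map_cons, List.append_assoc,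
      List.singleton_append]

-- ===== VERDICT (by name: the statement is the Claim_ definition above) =====
theorem noun_spec : Claim_equal_noun := by
  intro review_tags _
  show noun review_tags = noun_alt review_tags
  unfold noun
  rw [noun_outer_eq, noun_foldl_snd]
  simp
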